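-- pv_equiv track=rewrite | github.com/kishanrajput23/GFG-Problem-Solutions | Pattern_Printing/Python/Triangle_shrinking_downwards.py | triDownwards
-- ===== SOURCE A (Python) =====
-- def triDownwards(S):
--     # code here
--     res = ""
--     n = len(S)
--     for i in range(n):
--         for j in range(n):
--             if j >= i:
--                 res += S[j]
--             else:
--                 res += '.'
--     return res;
-- ===== SOURCE B (Python) =====
-- def triDownwards(S):
--     return ''.join('.' * i + S[i:] for i in range(len(S)))
-- ===== Notes on version B (the rewrite author's own statement) =====
-- stated objective: simpler
-- what changed: Builds the result row by row (i dots followed by the suffix S[i:], all joined) instead of a nested cell-by-cell loop with a per-cell branch and quadratic string concatenation.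
import Mathlib
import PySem

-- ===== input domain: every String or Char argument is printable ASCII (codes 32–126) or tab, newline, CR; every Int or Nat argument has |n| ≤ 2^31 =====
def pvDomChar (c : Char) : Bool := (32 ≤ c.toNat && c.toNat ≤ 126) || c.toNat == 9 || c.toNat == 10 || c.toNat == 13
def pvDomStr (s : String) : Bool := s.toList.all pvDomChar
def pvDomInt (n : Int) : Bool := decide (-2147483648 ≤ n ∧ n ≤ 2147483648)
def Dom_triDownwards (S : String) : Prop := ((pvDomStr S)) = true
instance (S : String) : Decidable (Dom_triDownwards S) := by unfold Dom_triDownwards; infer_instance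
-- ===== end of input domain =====

-- B builds the result row by row ('.'*i + S[i:], joined) instead of A's nested cell-by-cell loop; objective: simpler.


-- ===== PORT A =====
-- res = ""; for i in range(n): for j in range(n): res += S[j] if j >= i else '.'
def triDownwards (S : String) : String :=
  let cs := S.toList
  let n := cs.length
  String.mk ((List.range n).foldl (fun res i =>
    (List.range n).foldl (fun res j =>
      res ++ [if j ≥ i then cs.getD j ' ' else '.']) res) [])

-- ===== PORT B =====
-- ''.join('.' * i + S[i:] for i in range(len(S)))
def triDownwards_alt (S : String) : String :=
  String.mk ((List.range S.toList.length).flatMap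
    (fun i => List.replicate i '.' ++ S.toList.drop i))

-- ===== PRECONDITION & SPEC =====
def Spec_triDownwards (S : String) (out : String) : Prop := out = triDownwards_alt S
instance (S : String) (out : String) : Decidable (Spec_triDownwards S out) := by unfold Spec_triDownwards; infer_instance

-- ===== CLAIM (what is proved, stated in full; the proofs are below) =====
def Claim_equal_triDownwards : Prop := ∀ (S : String), Dom_triDownwards S → Spec_triDownwards S (triDownwards S)

-- ===== LEMMAS AND PROOFS =====

-- one row of A equals '.'*i ++ drop i (for i within the string)
theorem pvRow_eq (cs : List Char) (i : Nat) (hi : i ≤ cs.length) :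
    (List.range cs.length).map (fun j => if j ≥ i then cs.getD j ' ' else '.')
      = List.replicate i '.' ++ cs.drop i := by
  apply List.ext_getElem
  · simp [Nat.add_sub_cancel' hi]
  · intro k h1 h2
    simp only [List.getElem_map, List.getElem_range]
    rcases Nat.lt_or_ge k i with hk | hk
    · rw [List.getElem_append_left (by simpa using hk)]
      simp [Nat.not_le.mpr hk]
    · have hk' : k < cs.length := by simpa using h1
      rw [List.getElem_append_right (by simpa using hk)]
      simp [hk, List.getD_eq_getElem?_getD,
        List.length_replicate, Nat.add_sub_cancel' hk, hk']

theorem triDownwards_spec : Claim_equal_triDownwards := by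
  intro S _
  unfold Spec_triDownwards triDownwards triDownwards_alt
  simp only []
  congr 1
  rw [PySem.List.foldl_congr_mem (g := fun res i =>
        res ++ (List.replicate i '.' ++ S.toList.drop i))]
  · rw [PySem.List.foldl_append_eq_flatMap]
    simp
  · intro acc i hi
    rw [PySem.List.foldl_append_singleton_eq_map, pvRow_eq _ _ (Nat.le_of_lt (List.mem_range.mp hi))]
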